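-- pv_equiv track=rewrite | github.com/rocky-d/informatics | code/py/src/leetcode/undone/until20240401/p466.py | getMaxRepetitions
-- ===== SOURCE A (Python) =====
-- def getMaxRepetitions(s1: str, n1: int, s2: str, n2: int) -> int:
--     m, n = len(s1), len(s2)
--     dp = []
--     for i in range(n):
--         left, right = i, 0
--         for j in range(m):
--             if s1[j] == s2[left]:
--                 left += 1
--                 if left == n:
--                     left = 0
--                     right += 1
--         dp.append((left, right))
--     ans = 0
--     next_ = 0
--     for _ in range(n1):
--         ans += dp[next_][1]
--         next_ = dp[next_][0]
--     return ans // n2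
-- ===== SOURCE B (Python) =====
-- def getMaxRepetitions(s1: str, n1: int, s2: str, n2: int) -> int:
--     # Cycle detection over the start-index states of s2: compute each block
--     # transition lazily, stop as soon as a state repeats, and collapse the
--     # remaining blocks with a closed form.
--     n = len(s2)
--     seen = {}       # state -> block index at which it was first entered
--     sums = [0]      # sums[k] = copies of s2 completed after k blocks of s1
--     state, k = 0, 0
--     while k < n1:
--         if state in seen:
--             t0 = seen[state]
--             cycle_len = k - t0
--             cycle_gain = sums[k] - sums[t0]
--             q, r = divmod(n1 - t0, cycle_len)
--             return (sums[t0 + r] + q * cycle_gain) // n2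
--         seen[state] = k
--         left, right = state, 0
--         for c in s1:
--             if c == s2[left]:
--                 left += 1
--                 if left == n:
--                     left, right = 0, right + 1
--         state = left
--         sums.append(sums[k] + right)
--         k += 1
--     return sums[k] // n2
-- ===== Notes on version B (the rewrite author's own statement) =====
-- stated objective: faster
-- what changed: Instead of precomputing the transition table for every start index of s2 and then stepping n1 times, B computes block transitions lazily, detects the first repeated state, and collapses the remaining blocks with a closed-form quotient/remainder formula.
import Mathlib
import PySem

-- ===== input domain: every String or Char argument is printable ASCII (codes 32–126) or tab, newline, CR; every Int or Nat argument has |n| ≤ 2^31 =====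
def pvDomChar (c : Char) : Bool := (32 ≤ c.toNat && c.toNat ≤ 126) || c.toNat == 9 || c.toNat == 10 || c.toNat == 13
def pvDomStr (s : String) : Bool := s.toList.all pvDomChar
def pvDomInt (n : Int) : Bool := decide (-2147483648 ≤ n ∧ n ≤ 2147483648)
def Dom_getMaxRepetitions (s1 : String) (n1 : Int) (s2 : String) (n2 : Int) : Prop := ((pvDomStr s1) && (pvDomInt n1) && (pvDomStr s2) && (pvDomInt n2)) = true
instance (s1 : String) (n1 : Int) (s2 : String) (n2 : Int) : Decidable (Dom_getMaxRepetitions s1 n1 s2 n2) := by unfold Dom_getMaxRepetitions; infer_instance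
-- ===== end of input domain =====

-- B replaces A's precomputed dp table plus n1-step walk by lazy block transitions
-- with cycle detection and a closed-form collapse of the remaining blocks (faster).


-- ===== PORT A =====
-- inner scan of A's dp construction: one pass over s1 (indexed by j) from start index i of s2
def pvScanA (l1 l2 : List Char) (i : Nat) : Nat × Int :=
  (List.range l1.length).foldl
    (fun (st : Nat × Int) j =>
      if l1.getD j ' ' = l2.getD st.1 ' ' then
        if st.1 + 1 = l2.length then (0, st.2 + 1) else (st.1 + 1, st.2)
      else st)
    (i, 0)

def getMaxRepetitions (s1 : String) (n1 : Int) (s2 : String) (n2 : Int) : Int :=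
  let l1 := s1.toList
  let l2 := s2.toList
  let dp := (List.range l2.length).map (fun i => pvScanA l1 l2 i)
  let res := (List.range n1.toNat).foldl
    (fun (st : Int × Nat) _ =>
      let e := dp.getD st.2 (0, 0)
      (st.1 + e.2, e.1)) (0, 0)
  PySem.Int.floordiv res.1 n2

-- ===== PORT B =====
-- inner scan of one block in B: 'for c in s1' directly over the characters
def pvScanB (l1 l2 : List Char) (state : Nat) : Nat × Int :=
  l1.foldl
    (fun (p : Nat × Int) c =>
      if c = l2.getD p.1 ' ' then
        if p.1 + 1 = l2.length then (0, p.2 + 1) else (p.1 + 1, p.2)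
      else p)
    (state, 0)

-- B's while-loop; fuel = n1.toNat + 1 bounds the iterations (k increases towards n1)
def pvLoopB (l1 l2 : List Char) (n1 n2 : Int) (fuel : Nat)
    (seen : PySem.Dict Nat Nat) (sums : List Int) (state k : Nat) : Int :=
  match fuel with
  | 0 => PySem.Int.floordiv (sums.getD k 0) n2   -- never reached: the loop runs at most n1 times
  | fuel + 1 =>
    if (k : Int) < n1 then
      match seen.get? state with
      | some t0 =>
        let cl : Int := (k : Int) - (t0 : Int)
        let gain : Int := sums.getD k 0 - sums.getD t0 0
        let q : Int := PySem.Int.floordiv (n1 - (t0 : Int)) cl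
        let r : Int := PySem.Int.mod (n1 - (t0 : Int)) cl
        PySem.Int.floordiv (sums.getD (t0 + r.toNat) 0 + q * gain) n2
      | none =>
        let p := pvScanB l1 l2 state
        pvLoopB l1 l2 n1 n2 fuel (seen.insert state k)
          (sums ++ [sums.getD k 0 + p.2]) p.1 (k + 1)
    else PySem.Int.floordiv (sums.getD k 0) n2

def getMaxRepetitions_alt (s1 : String) (n1 : Int) (s2 : String) (n2 : Int) : Int :=
  pvLoopB s1.toList s2.toList n1 n2 (n1.toNat + 1) PySem.Dict.empty [0] 0 0

-- ===== PRECONDITION & SPEC =====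
-- Pre_ excludes exactly the inputs on which A raises: n2 = 0 (ZeroDivisionError on ans // n2)
-- and s2 = "" with n1 > 0 (dp is empty, dp[0] raises IndexError).
def Pre_getMaxRepetitions (s1 : String) (n1 : Int) (s2 : String) (n2 : Int) : Prop :=
  n2 ≠ 0 ∧ (0 < n1 → s2 ≠ "")
instance (s1 : String) (n1 : Int) (s2 : String) (n2 : Int) : Decidable (Pre_getMaxRepetitions s1 n1 s2 n2) := by unfold Pre_getMaxRepetitions; infer_instance

def pvWitness_getMaxRepetitions : String × Int × String × Int := ("acaab", 6, "aac", 2)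

def Spec_getMaxRepetitions (s1 : String) (n1 : Int) (s2 : String) (n2 : Int) (out : Int) : Prop := out = getMaxRepetitions_alt s1 n1 s2 n2
instance (s1 : String) (n1 : Int) (s2 : String) (n2 : Int) (out : Int) : Decidable (Spec_getMaxRepetitions s1 n1 s2 n2 out) := by unfold Spec_getMaxRepetitions; infer_instance

-- ===== CLAIM (what is proved, stated in full; the proofs are below) =====
def Claim_equal_getMaxRepetitions : Prop := ∀ (s1 : String) (n1 : Int) (s2 : String) (n2 : Int), Dom_getMaxRepetitions s1 n1 s2 n2 → Pre_getMaxRepetitions s1 n1 s2 n2 → Spec_getMaxRepetitions s1 n1 s2 n2 (getMaxRepetitions s1 n1 s2 n2)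

-- ===== LEMMAS AND PROOFS =====

-- one abstract block step: add the copies gained in this block, move to the next state
def pvStep (l1 l2 : List Char) (st : Int × Nat) : Int × Nat :=
  ((st.1 + (pvScanB l1 l2 st.2).2, (pvScanB l1 l2 st.2).1) : Int × Nat)

theorem pvScanA_eq_pvScanB (l1 l2 : List Char) (i : Nat) :
    pvScanA l1 l2 i = pvScanB l1 l2 i := by
  unfold pvScanA pvScanB
  have hmap : (List.range l1.length).map (fun j => l1.getD j ' ') = l1 := by
    apply List.ext_getElem
    · simp
    · intro j h1 h2
      simp [List.getD_eq_getElem?_getD, List.getElem?_eq_getElem h2]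
  conv_rhs => rw [← hmap]
  rw [List.foldl_map]

theorem pvScanB_fst_lt (l1 l2 : List Char) (hn : 0 < l2.length) :
    ∀ i, i < l2.length → (pvScanB l1 l2 i).1 < l2.length := by
  intro i hi
  unfold pvScanB
  suffices h : ∀ (l : List Char) (p : Nat × Int), p.1 < l2.length →
      (l.foldl (fun (p : Nat × Int) c =>
        if c = l2.getD p.1 ' ' then
          if p.1 + 1 = l2.length then (0, p.2 + 1) else (p.1 + 1, p.2)
        else p) p).1 < l2.length from h l1 (i, 0) hi
  intro l
  induction l with
  | nil => intro p hp; simpa using hp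
  | cons c t ih =>
    intro p hp
    simp only [List.foldl_cons]
    split_ifs with h1 h2
    · exact ih _ (by simpa using hn)
    · exact ih _ (by simp; omega)
    · exact ih _ hp

theorem pvStep_iter_snd_lt (l1 l2 : List Char) (hn : 0 < l2.length) (k : Nat) :
    ((pvStep l1 l2)^[k] (0, 0)).2 < l2.length := by
  induction k with
  | zero => simpa using hn
  | succ k ih =>
    rw [Function.iterate_succ_apply']
    exact pvScanB_fst_lt l1 l2 hn _ ih

-- A's second loop is the k-fold iterate of pvStep
theorem A_loop_eq_iter (l1 l2 : List Char) (hn : 0 < l2.length) (k : Nat) :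
    (List.range k).foldl
      (fun (st : Int × Nat) _ =>
        let e := ((List.range l2.length).map (fun i => pvScanA l1 l2 i)).getD st.2 (0, 0)
        (st.1 + e.2, e.1)) (0, 0) = (pvStep l1 l2)^[k] (0, 0) := by
  induction k with
  | zero => simp
  | succ k ih =>
    rw [List.range_succ, List.foldl_append, ih, List.foldl_cons, List.foldl_nil,
      Function.iterate_succ_apply']
    have hlt := pvStep_iter_snd_lt l1 l2 hn k
    simp only [PySem.List.getD_map_range _ _ _ _ hlt, pvScanA_eq_pvScanB, pvStep]

-- once a state repeats after L steps, states repeat and gains stay constant forever after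
theorem pvStep_cycle (l1 l2 : List Char) (t0 L : Nat)
    (hc : ((pvStep l1 l2)^[t0 + L] (0, 0)).2 = ((pvStep l1 l2)^[t0] (0, 0)).2) (j : Nat) :
    ((pvStep l1 l2)^[t0 + j + L] (0, 0)).2 = ((pvStep l1 l2)^[t0 + j] (0, 0)).2 ∧
    ((pvStep l1 l2)^[t0 + j + L] (0, 0)).1 =
      ((pvStep l1 l2)^[t0 + j] (0, 0)).1 +
        (((pvStep l1 l2)^[t0 + L] (0, 0)).1 - ((pvStep l1 l2)^[t0] (0, 0)).1) := by
  induction j with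
  | zero => exact ⟨by simpa using hc, by simp⟩
  | succ j ih =>
    obtain ⟨e1, e2⟩ := ih
    have h1 : t0 + (j + 1) + L = (t0 + j + L) + 1 := by omega
    have h2 : t0 + (j + 1) = (t0 + j) + 1 := by omega
    rw [h1, h2, Function.iterate_succ_apply', Function.iterate_succ_apply']
    refine ⟨by simp [pvStep, e1], ?_⟩
    simp only [pvStep]
    rw [e1, e2]
    ring

theorem pvStep_cycle_mul (l1 l2 : List Char) (t0 L : Nat)
    (hc : ((pvStep l1 l2)^[t0 + L] (0, 0)).2 = ((pvStep l1 l2)^[t0] (0, 0)).2)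
    (q r : Nat) :
    ((pvStep l1 l2)^[t0 + q * L + r] (0, 0)).1 =
      ((pvStep l1 l2)^[t0 + r] (0, 0)).1 +
        (q : Int) * (((pvStep l1 l2)^[t0 + L] (0, 0)).1 - ((pvStep l1 l2)^[t0] (0, 0)).1) := by
  induction q with
  | zero => simp
  | succ q ih =>
    have h1 : t0 + (q + 1) * L + r = t0 + (q * L + r) + L := by ring
    rw [h1, (pvStep_cycle l1 l2 t0 L hc (q * L + r)).2]
    have h2 : t0 + (q * L + r) = t0 + q * L + r := by ring
    rw [h2, ih]
    push_cast
    ring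

theorem B_loop_eq_iter (l1 l2 : List Char) (n1 n2 : Int) (N : Nat) (hN : n1 = (N : Int)) :
    ∀ fuel (seen : PySem.Dict Nat Nat) (sums : List Int) (state k : Nat),
      k ≤ N → N + 1 ≤ fuel + k →
      sums = (List.range (k + 1)).map (fun j => ((pvStep l1 l2)^[j] (0, 0)).1) →
      state = ((pvStep l1 l2)^[k] (0, 0)).2 →
      (∀ st t, seen.get? st = some t → t < k ∧ ((pvStep l1 l2)^[t] (0, 0)).2 = st) →
      pvLoopB l1 l2 n1 n2 fuel seen sums state k =
        PySem.Int.floordiv (((pvStep l1 l2)^[N] (0, 0)).1) n2 := by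
  intro fuel
  induction fuel with
  | zero => intro seen sums state k hk hf _ _ _; omega
  | succ fuel ih =>
    intro seen sums state k hk hf hsums hstate hseen
    rw [pvLoopB]
    by_cases hlt : (k : Int) < n1
    · rw [if_pos hlt]
      have hkN : k < N := by rw [hN] at hlt; exact_mod_cast hlt
      have hgk : sums.getD k 0 = ((pvStep l1 l2)^[k] (0, 0)).1 := by
        rw [hsums]; exact PySem.List.getD_map_range _ _ _ _ (by omega)
      cases hget : seen.get? state with
      | none =>
        dsimp only
        apply ih
        · omega
        · omega
        · rw [hsums, PySem.List.getD_map_range _ _ _ _ (show k < k + 1 by omega)]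
          conv_rhs => rw [List.range_succ, List.map_append]
          congr 1
          simp only [List.map_cons, List.map_nil]
          rw [Function.iterate_succ_apply']
          simp [pvStep, hstate]
        · rw [Function.iterate_succ_apply', pvStep, hstate]
        · intro st t hst
          rw [PySem.Dict.get?_insert] at hst
          split_ifs at hst with he
          · cases hst
            exact ⟨by omega, by rw [he, hstate]⟩
          · obtain ⟨h1, h2⟩ := hseen st t hst
            exact ⟨by omega, h2⟩
      | some t0 =>
        dsimp only
        obtain ⟨ht0k, ht0st⟩ := hseen state t0 hget
        have hLpos : 0 < k - t0 := by omega
        have hcl : (k : Int) - (t0 : Int) = ((k - t0 : Nat) : Int) := by omega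
        have hnt : n1 - (t0 : Int) = ((N - t0 : Nat) : Int) := by rw [hN]; omega
        have hq : PySem.Int.floordiv (n1 - (t0 : Int)) ((k : Int) - (t0 : Int))
            = (((N - t0) / (k - t0) : Nat) : Int) := by
          rw [hnt, hcl]; exact PySem.Int.floordiv_natCast _ _
        have hr : PySem.Int.mod (n1 - (t0 : Int)) ((k : Int) - (t0 : Int))
            = (((N - t0) % (k - t0) : Nat) : Int) := by
          rw [hnt, hcl]; exact PySem.Int.mod_natCast _ _
        have hrlt : (N - t0) % (k - t0) < k - t0 := Nat.mod_lt _ hLpos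
        have hNdecomp : t0 + ((N - t0) / (k - t0)) * (k - t0) + (N - t0) % (k - t0) = N := by
          have h1 := Nat.div_add_mod (N - t0) (k - t0)
          have h2 : ((N - t0) / (k - t0)) * (k - t0) = (k - t0) * ((N - t0) / (k - t0)) :=
            Nat.mul_comm _ _
          omega
        have hc : ((pvStep l1 l2)^[t0 + (k - t0)] (0, 0)).2 = ((pvStep l1 l2)^[t0] (0, 0)).2 := by
          have he : t0 + (k - t0) = k := by omega
          rw [he, ← hstate, ht0st]
        have hmul := pvStep_cycle_mul l1 l2 t0 (k - t0) hc ((N - t0) / (k - t0)) ((N - t0) % (k - t0))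
        rw [hNdecomp] at hmul
        rw [show t0 + (k - t0) = k from by omega] at hmul
        have hgt0 : sums.getD t0 0 = ((pvStep l1 l2)^[t0] (0, 0)).1 := by
          rw [hsums]; exact PySem.List.getD_map_range _ _ _ _ (by omega)
        have hgr : sums.getD (t0 + (N - t0) % (k - t0)) 0
            = ((pvStep l1 l2)^[t0 + (N - t0) % (k - t0)] (0, 0)).1 := by
          rw [hsums]; exact PySem.List.getD_map_range _ _ _ _ (by omega)
        rw [hq, hr, Int.toNat_natCast, hgr, hgk, hgt0, hmul]
    · rw [if_neg hlt]
      have hkeq : k = N := by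
        rw [hN] at hlt
        have : N ≤ k := by exact_mod_cast not_lt.mp hlt
        omega
      rw [hsums, PySem.List.getD_map_range _ _ _ _ (by omega), hkeq]

-- ===== VERDICT (by name: the statement is the Claim_ definition above) =====
theorem getMaxRepetitions_spec : Claim_equal_getMaxRepetitions := by
  intro s1 n1 s2 n2 _ hpre
  obtain ⟨hn2, hs2⟩ := hpre
  unfold Spec_getMaxRepetitions getMaxRepetitions getMaxRepetitions_alt
  dsimp only
  by_cases hpos : 0 < n1
  · have hne : s2.toList ≠ [] := fun h => hs2 hpos (String.toList_eq_nil_iff.mp h)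
    have hn : 0 < s2.toList.length := List.length_pos_iff.mpr hne
    have hN : n1 = (n1.toNat : Int) := (Int.toNat_of_nonneg hpos.le).symm
    rw [A_loop_eq_iter s1.toList s2.toList hn n1.toNat]
    rw [B_loop_eq_iter s1.toList s2.toList n1 n2 n1.toNat hN (n1.toNat + 1)
      PySem.Dict.empty [0] 0 0 (by omega) (by omega) (by simp) (by simp)
      (by intro st t h; simp [PySem.Dict.get?_empty] at h)]
  · have h0 : n1.toNat = 0 := by omega
    rw [h0, pvLoopB, if_neg (by simpa using hpos)]
    simp
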